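-- pv_equiv track=rewrite | github.com/gyalpodongo/robotics_hub | tools/twitter.py | extract_tweet_id_from_url
-- ===== SOURCE A (Python) =====
-- def extract_tweet_id_from_url(twitter_url: str) -> str:
--     if "status/" in twitter_url:
--         return twitter_url.split("status/")[-1].split("?")[0].strip()
--     elif "x.com" in twitter_url:
--         parts = twitter_url.split("/")
--         for i, part in enumerate(parts):
--             if part == "status" and i + 1 < len(parts):
--                 return parts[i + 1].split("?")[0].strip()
--     return twitter_url.strip()
-- ===== SOURCE B (Python) =====
-- def extract_tweet_id_from_url(twitter_url: str) -> str:
--     i = twitter_url.rfind("status/")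
--     if i == -1:
--         return twitter_url.strip()
--     tail = twitter_url[i + 7:]
--     q = tail.find("?")
--     if q != -1:
--         tail = tail[:q]
--     return tail.strip()
-- ===== Notes on version B (the rewrite author's own statement) =====
-- stated objective: idiomatic
-- what changed: B replaces A's split-into-lists pipeline and A's dead x.com loop with direct index arithmetic: a single rfind locates the last occurrence of the status marker, a single find locates the first query separator, and two slices extract the id, so no intermediate lists are built and the unreachable loop is dropped.
import Mathlib
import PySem

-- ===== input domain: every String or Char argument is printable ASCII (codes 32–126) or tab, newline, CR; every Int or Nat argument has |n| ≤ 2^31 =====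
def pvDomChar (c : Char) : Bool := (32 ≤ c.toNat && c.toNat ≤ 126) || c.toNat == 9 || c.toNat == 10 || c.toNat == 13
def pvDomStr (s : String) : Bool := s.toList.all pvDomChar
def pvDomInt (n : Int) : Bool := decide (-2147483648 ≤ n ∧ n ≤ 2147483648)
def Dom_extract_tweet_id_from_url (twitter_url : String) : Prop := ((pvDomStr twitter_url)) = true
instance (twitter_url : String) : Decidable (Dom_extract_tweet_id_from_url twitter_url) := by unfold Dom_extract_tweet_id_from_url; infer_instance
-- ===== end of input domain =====

-- B replaces A's split-into-lists pipeline (and A's dead x.com loop) by direct index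
-- arithmetic: one rfind, one find and two slices; return values are proved equal on all inputs.


-- ===== PORT A =====
-- A is ported on the code-point list (PySem.Chars.*); split(sep) with the nonempty literal
-- separators is PySem.Chars.splitOn (exact), [-1]/[0] are PySem.List.pyGet? with `.getD []`
-- (Python's split never returns an empty list, so those indexings cannot raise).
-- The `for i, part in enumerate(parts)` loop with its early return:
def pvA_loop (parts : List (List Char)) : List (Int × List Char) → Option (List Char)
  | [] => none
  | (i, part) :: rest =>
      if part = "status".toList ∧ i + 1 < (parts.length : Int) then
        some (PySem.Chars.strip ((PySem.List.pyGet?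
          (PySem.Chars.splitOn ((PySem.List.pyGet? parts (i + 1)).getD []) "?".toList) 0).getD []))
      else pvA_loop parts rest

def extract_tweet_id_from_url (twitter_url : String) : String :=
  if PySem.Chars.isIn "status/".toList twitter_url.toList then
    String.ofList (PySem.Chars.strip ((PySem.List.pyGet?
      (PySem.Chars.splitOn
        ((PySem.List.pyGet? (PySem.Chars.splitOn twitter_url.toList "status/".toList) (-1)).getD [])
        "?".toList) 0).getD []))
  else if PySem.Chars.isIn "x.com".toList twitter_url.toList then
    match pvA_loop (PySem.Chars.splitOn twitter_url.toList "/".toList)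
        (PySem.List.enumerate (PySem.Chars.splitOn twitter_url.toList "/".toList)) with
    | some r => String.ofList r
    | none => String.ofList (PySem.Chars.strip twitter_url.toList)
  else String.ofList (PySem.Chars.strip twitter_url.toList)

-- ===== PORT B =====
-- literal transliteration of Source B: rfind / slice / find / slice / strip on the code-point list
def extract_tweet_id_from_url_alt (twitter_url : String) : String :=
  let i := PySem.Chars.rfind twitter_url.toList "status/".toList
  if i = -1 then String.ofList (PySem.Chars.strip twitter_url.toList)
  else
    let tail := PySem.Chars.slice twitter_url.toList (some (i + 7)) none
    let q := PySem.Chars.find tail "?".toList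
    let tail2 := if q ≠ -1 then PySem.Chars.slice tail none (some q) else tail
    String.ofList (PySem.Chars.strip tail2)

-- ===== PRECONDITION & SPEC =====
def Spec_extract_tweet_id_from_url (twitter_url : String) (out : String) : Prop := out = extract_tweet_id_from_url_alt twitter_url
instance (twitter_url : String) (out : String) : Decidable (Spec_extract_tweet_id_from_url twitter_url out) := by unfold Spec_extract_tweet_id_from_url; infer_instance

-- ===== CLAIM (what is proved, stated in full; the proofs are below) =====
def Claim_equal_extract_tweet_id_from_url : Prop := ∀ (twitter_url : String), Dom_extract_tweet_id_from_url twitter_url → Spec_extract_tweet_id_from_url twitter_url (extract_tweet_id_from_url twitter_url)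

-- ===== LEMMAS AND PROOFS =====

-- A fuel-free reference version of PySem.Chars.splitOn.go, to reason about A's splits.
def pvSplit (sep : List Char) : List Char → List Char → List (List Char) → List (List Char)
  | [], cur, acc => (cur.reverse :: acc).reverse
  | c :: rest, cur, acc =>
      if h : sep.isPrefixOf (c :: rest) = true ∧ sep ≠ [] then
        pvSplit sep ((c :: rest).drop sep.length) [] (cur.reverse :: acc)
      else
        pvSplit sep rest (c :: cur) acc
termination_by l _ _ => l.length
decreasing_by
  · have h1 : 0 < sep.length := List.length_pos_of_ne_nil h.2
    simp [List.length_drop]; omega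
  · simp

theorem pvSplit_nil (sep cur : List Char) (acc : List (List Char)) :
    pvSplit sep [] cur acc = (cur.reverse :: acc).reverse := by
  rw [pvSplit]

theorem pvSplit_pos (sep : List Char) (c : Char) (rest cur : List Char) (acc : List (List Char))
    (h1 : sep.isPrefixOf (c :: rest) = true) (h2 : sep ≠ []) :
    pvSplit sep (c :: rest) cur acc = pvSplit sep ((c :: rest).drop sep.length) [] (cur.reverse :: acc) := by
  rw [pvSplit, dif_pos ⟨h1, h2⟩]

theorem pvSplit_neg (sep : List Char) (c : Char) (rest cur : List Char) (acc : List (List Char))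
    (h1 : ¬ sep.isPrefixOf (c :: rest) = true) :
    pvSplit sep (c :: rest) cur acc = pvSplit sep rest (c :: cur) acc := by
  rw [pvSplit, dif_neg (by tauto)]

theorem go_eq_pvSplit (sep : List Char) (hsep : sep ≠ []) :
    ∀ (fuel : Nat) (l cur : List Char) (acc : List (List Char)), l.length ≤ fuel →
      PySem.Chars.splitOn.go sep fuel l cur acc = pvSplit sep l cur acc := by
  intro fuel
  induction fuel with
  | zero =>
    intro l cur acc hl
    have : l = [] := by cases l with
      | nil => rfl
      | cons a b => simp at hl
    subst this
    rw [PySem.Chars.splitOn.go, pvSplit_nil]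
    simp
  | succ n ih =>
    intro l cur acc hl
    cases l with
    | nil =>
      rw [PySem.Chars.splitOn.go, pvSplit_nil]
      omega
    | cons c rest =>
      rw [PySem.Chars.splitOn.go]
      by_cases hp : sep.isPrefixOf (c :: rest) = true
      · rw [if_pos hp, pvSplit_pos sep c rest cur acc hp hsep]
        apply ih
        have h1 : 0 < sep.length := List.length_pos_of_ne_nil hsep
        simp at hl ⊢
        omega
      · rw [if_neg hp, pvSplit_neg sep c rest cur acc hp]
        apply ih
        simp at hl ⊢
        omega

theorem splitOn_eq_pvSplit (sep : List Char) (hsep : sep ≠ []) (l : List Char) :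
    PySem.Chars.splitOn l sep = pvSplit sep l [] [] := by
  rw [PySem.Chars.splitOn]
  exact go_eq_pvSplit sep hsep (l.length + 1) l [] [] (by omega)

theorem pvSplit_acc (sep : List Char) :
    ∀ (n : Nat) (l : List Char), l.length ≤ n → ∀ (cur : List Char) (acc : List (List Char)),
      pvSplit sep l cur acc = acc.reverse ++ pvSplit sep l cur [] := by
  intro n
  induction n with
  | zero =>
    intro l hl cur acc
    have : l = [] := by cases l with
      | nil => rfl
      | cons a b => simp at hl
    subst this
    rw [pvSplit_nil, pvSplit_nil]
    simp
  | succ n ih =>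
    intro l hl cur acc
    cases l with
    | nil => rw [pvSplit_nil, pvSplit_nil]; simp
    | cons c rest =>
      by_cases hp : sep.isPrefixOf (c :: rest) = true ∧ sep ≠ []
      · rw [pvSplit_pos sep c rest cur acc hp.1 hp.2, pvSplit_pos sep c rest cur [] hp.1 hp.2]
        have h1 : 0 < sep.length := List.length_pos_of_ne_nil hp.2
        have hlen : ((c :: rest).drop sep.length).length ≤ n := by simp at hl ⊢; omega
        rw [ih _ hlen [] (cur.reverse :: acc), ih _ hlen [] [cur.reverse]]
        simp
      · rcases Decidable.not_and_iff_not_or_not.mp hp with hp1 | hp2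
        · rw [pvSplit_neg sep c rest cur acc hp1, pvSplit_neg sep c rest cur [] hp1]
          exact ih rest (by simp at hl ⊢; omega) (c :: cur) acc
        · -- sep = [] : the prefix test is true, contradiction with hp only if also ≠ []; here sep = [] so the dite is false
          have hp1 : ¬ (sep.isPrefixOf (c :: rest) = true ∧ sep ≠ []) := hp
          rw [pvSplit, dif_neg hp1, pvSplit, dif_neg hp1]
          exact ih rest (by simp at hl ⊢; omega) (c :: cur) acc

theorem pvSplit_cur (sep : List Char) (hsep : sep ≠ []) :
    ∀ (n : Nat) (l : List Char), l.length ≤ n →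
      ∃ p ps, ∀ cur : List Char, pvSplit sep l cur [] = (cur.reverse ++ p) :: ps := by
  intro n
  induction n with
  | zero =>
    intro l hl
    have : l = [] := by cases l with
      | nil => rfl
      | cons a b => simp at hl
    subst this
    exact ⟨[], [], fun cur => by rw [pvSplit_nil]; simp⟩
  | succ n ih =>
    intro l hl
    cases l with
    | nil => exact ⟨[], [], fun cur => by rw [pvSplit_nil]; simp⟩
    | cons c rest =>
      by_cases hp : sep.isPrefixOf (c :: rest) = true
      · refine ⟨[], pvSplit sep ((c :: rest).drop sep.length) [] [], fun cur => ?_⟩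
        rw [pvSplit_pos sep c rest cur [] hp hsep]
        have h1 : 0 < sep.length := List.length_pos_of_ne_nil hsep
        have hlen : ((c :: rest).drop sep.length).length ≤ n := by simp at hl ⊢; omega
        rw [pvSplit_acc sep n _ hlen [] [cur.reverse]]
        simp
      · obtain ⟨p, ps, hps⟩ := ih rest (by simp at hl ⊢; omega)
        refine ⟨c :: p, ps, fun cur => ?_⟩
        rw [pvSplit_neg sep c rest cur [] hp, hps (c :: cur)]
        simp

theorem splitOn_cur (sep : List Char) (hsep : sep ≠ []) (l : List Char) :
    ∃ p ps, ∀ cur : List Char, pvSplit sep l cur [] = (cur.reverse ++ p) :: ps :=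
  pvSplit_cur sep hsep l.length l le_rfl

theorem splitOn_ne_nil (sep : List Char) (hsep : sep ≠ []) (l : List Char) :
    PySem.Chars.splitOn l sep ≠ [] := by
  obtain ⟨p, ps, hps⟩ := splitOn_cur sep hsep l
  rw [splitOn_eq_pvSplit sep hsep, hps []]
  simp

theorem splitOn_nil (sep : List Char) (hsep : sep ≠ []) :
    PySem.Chars.splitOn [] sep = [[]] := by
  rw [splitOn_eq_pvSplit sep hsep, pvSplit_nil]
  simp

theorem splitOn_pos (sep : List Char) (hsep : sep ≠ []) (c : Char) (rest : List Char)
    (hp : sep.isPrefixOf (c :: rest) = true) :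
    PySem.Chars.splitOn (c :: rest) sep = [] :: PySem.Chars.splitOn ((c :: rest).drop sep.length) sep := by
  rw [splitOn_eq_pvSplit sep hsep, pvSplit_pos sep c rest [] [] hp hsep]
  have h1 : 0 < sep.length := List.length_pos_of_ne_nil hsep
  rw [pvSplit_acc sep ((c :: rest).drop sep.length).length _ le_rfl [] _]
  rw [splitOn_eq_pvSplit sep hsep]
  simp

theorem splitOn_neg (sep : List Char) (hsep : sep ≠ []) (c : Char) (rest : List Char)
    (hp : ¬ sep.isPrefixOf (c :: rest) = true) (p : List Char) (ps : List (List Char))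
    (hrest : PySem.Chars.splitOn rest sep = p :: ps) :
    PySem.Chars.splitOn (c :: rest) sep = (c :: p) :: ps := by
  obtain ⟨p', ps', hps⟩ := splitOn_cur sep hsep rest
  have h0 : PySem.Chars.splitOn rest sep = p' :: ps' := by
    rw [splitOn_eq_pvSplit sep hsep, hps []]; simp
  rw [h0] at hrest
  injection hrest with e1 e2
  subst e1; subst e2
  rw [splitOn_eq_pvSplit sep hsep, pvSplit_neg sep c rest [] [] hp, hps [c]]
  simp

-- find: recursion equations
theorem find_go_shift (sub : List Char) :
    ∀ (l : List Char) (k : Nat), PySem.Chars.find.go sub l k =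
      if PySem.Chars.find.go sub l 0 = -1 then -1 else PySem.Chars.find.go sub l 0 + k := by
  intro l
  induction l with
  | nil =>
    intro k
    rw [PySem.Chars.find.go, PySem.Chars.find.go]
    by_cases h : sub.isEmpty = true
    · simp [h]
    · simp [h]
  | cons c t ih =>
    intro k
    rw [PySem.Chars.find.go]
    conv_rhs => rw [PySem.Chars.find.go]
    by_cases h : sub.isPrefixOf (c :: t) = true
    · simp [h]
    · simp only [h, if_false]
      rw [ih (k + 1), ih 1]
      by_cases h0 : PySem.Chars.find.go sub t 0 = -1
      · simp [h0]
      · simp only [h0, if_false]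
        have : PySem.Chars.find.go sub t 0 + 1 ≠ -1 := by
          have := PySem.Chars.neg_one_le_find t sub
          rw [PySem.Chars.find] at this
          omega
        split <;> omega

theorem find_nil (sub : List Char) (hsub : sub ≠ []) : PySem.Chars.find [] sub = -1 := by
  rw [PySem.Chars.find, PySem.Chars.find.go]
  simp [hsub]

theorem find_cons (sub : List Char) (c : Char) (rest : List Char) :
    PySem.Chars.find (c :: rest) sub =
      if sub.isPrefixOf (c :: rest) = true then 0
      else if PySem.Chars.find rest sub = -1 then -1 else PySem.Chars.find rest sub + 1 := by
  rw [PySem.Chars.find, PySem.Chars.find.go]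
  by_cases h : sub.isPrefixOf (c :: rest) = true
  · simp [h]
  · simp only [h]
    rw [find_go_shift sub rest 1, PySem.Chars.find]
    simp

-- rfind: full spec of the scan-down loop
theorem rfind_go_spec (s sub : List Char) :
    ∀ j : Nat, (PySem.Chars.rfind.go s sub j = -1 ∧ ∀ i ≤ j, ¬ sub <+: s.drop i) ∨
      (∃ k : Nat, PySem.Chars.rfind.go s sub j = (k : Int) ∧ k ≤ j ∧ sub <+: s.drop k ∧
        ∀ i, k < i → i ≤ j → ¬ sub <+: s.drop i) := by
  intro j
  induction j with
  | zero =>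
    rw [PySem.Chars.rfind.go]
    by_cases h : sub.isPrefixOf s = true
    · right
      refine ⟨0, by simp [h], le_refl 0, ?_, ?_⟩
      · simpa using List.isPrefixOf_iff_prefix.mp h
      · intro i h1 h2; omega
    · left
      refine ⟨by simp [h], ?_⟩
      intro i hi
      have : i = 0 := by omega
      subst this
      rw [List.drop_zero]
      exact fun hc => h (List.isPrefixOf_iff_prefix.mpr hc)
  | succ j ih =>
    rw [PySem.Chars.rfind.go]
    by_cases h : sub.isPrefixOf (s.drop (j + 1)) = true
    · right
      refine ⟨j + 1, by simp [h], le_refl _, List.isPrefixOf_iff_prefix.mp h, ?_⟩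
      intro i h1 h2; omega
    · rcases ih with ⟨hval, hnone⟩ | ⟨k, hval, hle, hpre, hmax⟩
      · left
        refine ⟨by simp [h, hval], ?_⟩
        intro i hi
        rcases Nat.lt_or_ge i (j + 1) with hi' | hi'
        · exact hnone i (by omega)
        · have : i = j + 1 := by omega
          subst this
          exact fun hc => h (List.isPrefixOf_iff_prefix.mpr hc)
      · right
        refine ⟨k, by simp [h, hval], by omega, hpre, ?_⟩
        intro i h1 h2
        rcases Nat.lt_or_ge i (j + 1) with hi' | hi'
        · exact hmax i h1 (by omega)
        · have : i = j + 1 := by omega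
          subst this
          exact fun hc => h (List.isPrefixOf_iff_prefix.mpr hc)

theorem rfind_eq_go (l sub : List Char) : PySem.Chars.rfind l sub = PySem.Chars.rfind.go l sub l.length := by
  rw [PySem.Chars.rfind]

theorem rfind_neg_iff (sub : List Char) (hsub : sub ≠ []) (l : List Char) :
    PySem.Chars.rfind l sub = -1 ↔ ¬ sub <:+: l := by
  rw [rfind_eq_go]
  constructor
  · intro heq hinf
    rcases rfind_go_spec l sub l.length with ⟨_, hnone⟩ | ⟨k, hval, _, _, _⟩
    · obtain ⟨j, hj⟩ := (PySem.Chars.exists_prefix_drop_iff_isIn sub l).mpr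
        ((PySem.Chars.isIn_iff_infix sub l).mpr hinf)
      rcases Nat.lt_or_ge l.length j with hj' | hj'
      · have : l.drop j = [] := List.drop_eq_nil_iff.mpr (by omega)
        rw [this] at hj
        exact hsub (List.prefix_nil.mp hj)
      · exact hnone j hj' hj
    · rw [hval] at heq; omega
  · intro hinf
    rcases rfind_go_spec l sub l.length with ⟨hval, _⟩ | ⟨k, _, _, hpre, _⟩
    · exact hval
    · exact absurd (hpre.isInfix.trans (l.drop_suffix k).isInfix) hinf

theorem rfind_spec_of_ne (sub : List Char) (l : List Char)
    (h : PySem.Chars.rfind l sub ≠ -1) :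
    ∃ k : Nat, PySem.Chars.rfind l sub = (k : Int) ∧ k ≤ l.length ∧ sub <+: l.drop k ∧
      ∀ i, k < i → i ≤ l.length → ¬ sub <+: l.drop i := by
  rw [rfind_eq_go] at h ⊢
  rcases rfind_go_spec l sub l.length with ⟨hval, _⟩ | ⟨k, hval, hle, hpre, hmax⟩
  · exact absurd hval h
  · exact ⟨k, hval, hle, hpre, hmax⟩

theorem rfind_go_unique (s sub : List Char) (j k : Nat) (hk : k ≤ j)
    (hpre : sub <+: s.drop k) (hmax : ∀ i, k < i → i ≤ j → ¬ sub <+: s.drop i) :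
    PySem.Chars.rfind.go s sub j = (k : Int) := by
  rcases rfind_go_spec s sub j with ⟨_, hnone⟩ | ⟨k', hval, hle', hpre', hmax'⟩
  · exact absurd hpre (hnone k hk)
  · rcases Nat.lt_trichotomy k k' with h | h | h
    · exact absurd hpre' (hmax k' h hle')
    · subst h; exact hval
    · exact absurd hpre (hmax' k h hk)

theorem rfind_cons (sub : List Char) (hsub : sub ≠ []) (c : Char) (rest : List Char) :
    PySem.Chars.rfind (c :: rest) sub =
      if PySem.Chars.rfind rest sub = -1 then
        (if sub.isPrefixOf (c :: rest) = true then 0 else -1)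
      else PySem.Chars.rfind rest sub + 1 := by
  by_cases h : PySem.Chars.rfind rest sub = -1
  · rw [if_pos h]
    have hninf : ¬ sub <:+: rest := (rfind_neg_iff sub hsub rest).mp h
    by_cases hp : sub.isPrefixOf (c :: rest) = true
    · rw [if_pos hp, rfind_eq_go]
      apply rfind_go_unique _ _ _ 0 (by omega)
      · simpa using List.isPrefixOf_iff_prefix.mp hp
      · intro i h1 h2 hc
        have : sub <:+: rest := by
          have : (c :: rest).drop i <:+ rest := by
            have : (c :: rest).drop i = rest.drop (i - 1) := by
              cases i with
              | zero => omega
              | succ m => simp [List.drop_succ_cons]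
            rw [this]; exact rest.drop_suffix _
          exact hc.isInfix.trans this.isInfix
        exact hninf this
    · rw [if_neg hp]
      apply (rfind_neg_iff sub hsub (c :: rest)).mpr
      intro hinf
      rcases List.infix_cons_iff.mp hinf with hc | hc
      · exact hp (List.isPrefixOf_iff_prefix.mpr hc)
      · exact hninf hc
  · rw [if_neg h]
    obtain ⟨k, hval, hle, hpre, hmax⟩ := rfind_spec_of_ne sub rest h
    rw [hval, rfind_eq_go]
    have : ((k : Int) + 1) = ((k + 1 : Nat) : Int) := by push_cast; ring
    rw [this]
    apply rfind_go_unique _ _ _ (k + 1) (by simp; omega)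
    · simpa [List.drop_succ_cons] using hpre
    · intro i h1 h2 hc
      cases i with
      | zero => omega
      | succ m =>
        rw [List.drop_succ_cons] at hc
        exact hmax m (by omega) (by simp at h2; omega) hc

-- "status/" has no proper border: an occurrence overlapping a given one is impossible.
theorem status_no_overlap (l : List Char) (p : Nat) (h1 : 1 ≤ p) (h2 : p ≤ 6)
    (hpre : "status/".toList <+: l) : ¬ "status/".toList <+: l.drop p := by
  intro h
  have hlen : ("status/".toList).length = 7 := by decide
  have e1 : "status/".toList = l.take 7 := by
    have := List.prefix_iff_eq_take.mp hpre
    rwa [hlen] at this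
  have e2 : "status/".toList = (l.drop p).take 7 := by
    have := List.prefix_iff_eq_take.mp h
    rwa [hlen] at this
  have e3 : List.drop p ("status/".toList) = List.take (7 - p) ("status/".toList) := by
    calc List.drop p ("status/".toList) = List.drop p (l.take 7) := by rw [e1]
      _ = List.take (7 - p) (l.drop p) := by rw [List.drop_take]
      _ = List.take (7 - p) ((l.drop p).take 7) := by rw [List.take_take]; congr 1; omega
      _ = List.take (7 - p) ("status/".toList) := by rw [← e2]
  interval_cases p <;> simp_all

theorem rfind_step (l : List Char) (hpre : "status/".toList <+: l) :
    PySem.Chars.rfind l "status/".toList =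
      if PySem.Chars.rfind (l.drop 7) "status/".toList = -1 then 0
      else PySem.Chars.rfind (l.drop 7) "status/".toList + 7 := by
  have hsub : "status/".toList ≠ [] := by decide
  have hlen : ("status/".toList).length = 7 := by decide
  have h7 : 7 ≤ l.length := by have := hpre.length_le; omega
  by_cases h : PySem.Chars.rfind (l.drop 7) "status/".toList = -1
  · rw [if_pos h]
    have hninf : ¬ "status/".toList <:+: l.drop 7 := (rfind_neg_iff _ hsub _).mp h
    rw [rfind_eq_go]
    apply rfind_go_unique _ _ _ 0 (by omega)
    · simpa using hpre
    · intro i hi hile hc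
      rcases Nat.lt_or_ge i 7 with hi7 | hi7
      · exact status_no_overlap l i (by omega) (by omega) hpre hc
      · apply hninf
        have : l.drop i = (l.drop 7).drop (i - 7) := by
          rw [List.drop_drop]; congr 1; omega
        rw [this] at hc
        exact hc.isInfix.trans ((l.drop 7).drop_suffix (i - 7)).isInfix
  · rw [if_neg h]
    obtain ⟨k, hval, hle, hpre', hmax⟩ := rfind_spec_of_ne _ _ h
    rw [hval, rfind_eq_go]
    have : ((k : Int) + 7) = ((k + 7 : Nat) : Int) := by push_cast; ring
    rw [this]
    apply rfind_go_unique _ _ _ (k + 7) (by simp at hle ⊢; omega)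
    · have : l.drop (k + 7) = (l.drop 7).drop k := by rw [List.drop_drop]; congr 1; omega
      rw [this]; exact hpre'
    · intro i hi hile hc
      have hi7 : 7 ≤ i := by omega
      have : l.drop i = (l.drop 7).drop (i - 7) := by rw [List.drop_drop]; congr 1; omega
      rw [this] at hc
      exact hmax (i - 7) (by omega) (by simp; omega) hc

theorem splitOn_noocc (sep : List Char) (hsep : sep ≠ []) :
    ∀ l : List Char, ¬ sep <:+: l → PySem.Chars.splitOn l sep = [l] := by
  intro l
  induction l with
  | nil => intro _; exact splitOn_nil sep hsep
  | cons c rest ih =>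
    intro h
    have hp : ¬ sep.isPrefixOf (c :: rest) = true := fun hp =>
      h (List.isPrefixOf_iff_prefix.mp hp).isInfix
    have hr : ¬ sep <:+: rest := fun hr => h (List.infix_cons_iff.mpr (Or.inr hr))
    exact splitOn_neg sep hsep c rest hp rest [] (ih hr)

theorem splitOn_two (sep : List Char) (hsep : sep ≠ []) :
    ∀ (n : Nat) (l : List Char), l.length ≤ n → sep <:+: l → 2 ≤ (PySem.Chars.splitOn l sep).length := by
  intro n
  induction n with
  | zero =>
    intro l hl hinf
    have : l = [] := by cases l with
      | nil => rfl
      | cons a b => simp at hl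
    subst this
    exact absurd (List.infix_nil.mp hinf) hsep
  | succ n ih =>
    intro l hl hinf
    cases l with
    | nil => exact absurd (List.infix_nil.mp hinf) hsep
    | cons c rest =>
      by_cases hp : sep.isPrefixOf (c :: rest) = true
      · rw [splitOn_pos sep hsep c rest hp]
        have := splitOn_ne_nil sep hsep ((c :: rest).drop sep.length)
        have := List.length_pos_of_ne_nil this
        simp
        omega
      · have hr : sep <:+: rest := by
          rcases List.infix_cons_iff.mp hinf with hc | hc
          · exact absurd (List.isPrefixOf_iff_prefix.mpr hc) hp
          · exact hc
        obtain ⟨p, ps, hps⟩ : ∃ p ps, PySem.Chars.splitOn rest sep = p :: ps := by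
          rcases hhh : PySem.Chars.splitOn rest sep with _ | ⟨p, ps⟩
          · exact absurd hhh (splitOn_ne_nil sep hsep rest)
          · exact ⟨p, ps, rfl⟩
        rw [splitOn_neg sep hsep c rest hp p ps hps]
        have := ih rest (by simp at hl ⊢; omega) hr
        rw [hps] at this
        simpa using this

theorem splitOn_first (sep : List Char) (hsep : sep ≠ []) :
    ∀ (n : Nat) (l : List Char), l.length ≤ n → ∀ (p : List Char) (ps : List (List Char)),
      PySem.Chars.splitOn l sep = p :: ps → ps ≠ [] → (p ++ sep) <+: l := by
  intro n
  induction n with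
  | zero =>
    intro l hl p ps hps hne
    have : l = [] := by cases l with
      | nil => rfl
      | cons a b => simp at hl
    subst this
    rw [splitOn_nil sep hsep] at hps
    injection hps with e1 e2
    exact absurd e2.symm hne
  | succ n ih =>
    intro l hl p ps hps hne
    cases l with
    | nil =>
      rw [splitOn_nil sep hsep] at hps
      injection hps with e1 e2
      exact absurd e2.symm hne
    | cons c rest =>
      by_cases hp : sep.isPrefixOf (c :: rest) = true
      · rw [splitOn_pos sep hsep c rest hp] at hps
        injection hps with e1 e2
        subst e1
        simpa using List.isPrefixOf_iff_prefix.mp hp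
      · obtain ⟨p', ps', hps'⟩ : ∃ p' ps', PySem.Chars.splitOn rest sep = p' :: ps' := by
          rcases hhh : PySem.Chars.splitOn rest sep with _ | ⟨p', ps'⟩
          · exact absurd hhh (splitOn_ne_nil sep hsep rest)
          · exact ⟨p', ps', rfl⟩
        rw [splitOn_neg sep hsep c rest hp p' ps' hps'] at hps
        injection hps with e1 e2
        subst e2
        have := ih rest (by simp at hl ⊢; omega) p' ps' hps' hne
        rw [← e1]
        simp [List.cons_prefix_cons] at this ⊢; exact this

theorem splitOn_infix (sep : List Char) (hsep : sep ≠ []) :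
    ∀ (n : Nat) (l : List Char), l.length ≤ n → ∀ (pre : List (List Char)) (w : List Char) (suf : List (List Char)),
      PySem.Chars.splitOn l sep = pre ++ w :: suf → suf ≠ [] → (w ++ sep) <:+: l := by
  intro n
  induction n with
  | zero =>
    intro l hl pre w suf hps hne
    have : l = [] := by cases l with
      | nil => rfl
      | cons a b => simp at hl
    subst this
    rw [splitOn_nil sep hsep] at hps
    have := congrArg List.length hps
    simp at this
    have : suf = [] := by
      cases suf with
      | nil => rfl
      | cons a b => simp at this; omega
    exact absurd this hne
  | succ n ih =>
    intro l hl pre w suf hps hne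
    cases l with
    | nil =>
      rw [splitOn_nil sep hsep] at hps
      have := congrArg List.length hps
      simp at this
      have : suf = [] := by
        cases suf with
        | nil => rfl
        | cons a b => simp at this; omega
      exact absurd this hne
    | cons c rest =>
      have h1 : 0 < sep.length := List.length_pos_of_ne_nil hsep
      by_cases hp : sep.isPrefixOf (c :: rest) = true
      · rw [splitOn_pos sep hsep c rest hp] at hps
        cases pre with
        | nil =>
          simp at hps
          obtain ⟨e1, e2⟩ := hps
          subst e1
          simpa using (List.isPrefixOf_iff_prefix.mp hp).isInfix
        | cons q pre' =>
          simp at hps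
          obtain ⟨e1, e2⟩ := hps
          have := ih ((c :: rest).drop sep.length) (by simp at hl ⊢; omega) pre' w suf e2 hne
          exact this.trans ((c :: rest).drop_suffix sep.length).isInfix
      · obtain ⟨p', ps', hps'⟩ : ∃ p' ps', PySem.Chars.splitOn rest sep = p' :: ps' := by
          rcases hhh : PySem.Chars.splitOn rest sep with _ | ⟨p', ps'⟩
          · exact absurd hhh (splitOn_ne_nil sep hsep rest)
          · exact ⟨p', ps', rfl⟩
        rw [splitOn_neg sep hsep c rest hp p' ps' hps'] at hps
        cases pre with
        | nil =>
          simp at hps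
          obtain ⟨e1, e2⟩ := hps
          subst e2
          have hpsne : ps' ≠ [] := by simp_all
          have hfirst := splitOn_first sep hsep rest.length rest le_rfl p' ps' hps' hpsne
          have hw : w = c :: p' := by simp_all
          subst hw
          have hfin : (c :: p') ++ sep <+: (c :: rest) := by
            simpa [List.cons_prefix_cons] using hfirst
          exact hfin.isInfix
        | cons q pre' =>
          simp at hps
          obtain ⟨e1, e2⟩ := hps
          have : PySem.Chars.splitOn rest sep = (p' :: pre') ++ w :: suf := by rw [hps', e2]; simp
          have := ih rest (by simp at hl ⊢; omega) (p' :: pre') w suf this hne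
          exact List.infix_cons_iff.mpr (Or.inr this)

theorem splitOn_head (sep : List Char) (hsep : sep ≠ []) :
    ∀ (n : Nat) (l : List Char), l.length ≤ n →
      (PySem.Chars.splitOn l sep).head? =
        some (if PySem.Chars.find l sep = -1 then l else l.take (PySem.Chars.find l sep).toNat) := by
  intro n
  induction n with
  | zero =>
    intro l hl
    have : l = [] := by cases l with
      | nil => rfl
      | cons a b => simp at hl
    subst this
    rw [splitOn_nil sep hsep, find_nil sep hsep]
    simp
  | succ n ih =>
    intro l hl
    cases l with
    | nil =>
      rw [splitOn_nil sep hsep, find_nil sep hsep]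
      simp
    | cons c rest =>
      rw [find_cons]
      by_cases hp : sep.isPrefixOf (c :: rest) = true
      · rw [splitOn_pos sep hsep c rest hp, if_pos hp]
        norm_num
      · rw [if_neg hp]
        obtain ⟨p', ps', hps'⟩ : ∃ p' ps', PySem.Chars.splitOn rest sep = p' :: ps' := by
          rcases hhh : PySem.Chars.splitOn rest sep with _ | ⟨p', ps'⟩
          · exact absurd hhh (splitOn_ne_nil sep hsep rest)
          · exact ⟨p', ps', rfl⟩
        rw [splitOn_neg sep hsep c rest hp p' ps' hps']
        have hih := ih rest (by simp at hl ⊢; omega)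
        rw [hps'] at hih
        simp at hih
        by_cases hf : PySem.Chars.find rest sep = -1
        · rw [if_pos hf] at hih ⊢
          simp [hih]
        · rw [if_neg hf] at hih
          have hge : 0 ≤ PySem.Chars.find rest sep := by
            have := PySem.Chars.neg_one_le_find rest sep
            omega
          have hne' : PySem.Chars.find rest sep + 1 ≠ -1 := by omega
          rw [if_neg hf, if_neg hne']
          have : (PySem.Chars.find rest sep + 1).toNat = (PySem.Chars.find rest sep).toNat + 1 := by omega
          rw [this, List.take_succ_cons]
          simp [hih]

theorem splitOn_last :
    ∀ (n : Nat) (l : List Char), l.length ≤ n →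
      (PySem.Chars.splitOn l "status/".toList).getLast? =
        some (if PySem.Chars.rfind l "status/".toList = -1 then l
              else l.drop ((PySem.Chars.rfind l "status/".toList).toNat + 7)) := by
  have hsub : "status/".toList ≠ [] := by decide
  intro n
  induction n with
  | zero =>
    intro l hl
    have : l = [] := by cases l with
      | nil => rfl
      | cons a b => simp at hl
    subst this
    rw [splitOn_nil _ hsub]
    rw [if_pos ((rfind_neg_iff _ hsub []).mpr (by simpa using hsub))]
    simp
  | succ n ih =>
    intro l hl
    by_cases hinf : "status/".toList <:+: l
    case neg =>
      rw [splitOn_noocc _ hsub l hinf]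
      rw [if_pos ((rfind_neg_iff _ hsub l).mpr hinf)]
      simp
    case pos =>
    cases l with
    | nil => exact absurd (List.infix_nil.mp hinf) hsub
    | cons c rest =>
      by_cases hp : ("status/".toList).isPrefixOf (c :: rest) = true
      · have hpre : "status/".toList <+: (c :: rest) := List.isPrefixOf_iff_prefix.mp hp
        have hlen7 : ("status/".toList).length = 7 := by decide
        rw [splitOn_pos _ hsub c rest hp, hlen7]
        have hstep := rfind_step (c :: rest) hpre
        have hd : ((c :: rest).drop 7).length ≤ n := by simp at hl ⊢; omega
        have hih := ih ((c :: rest).drop 7) hd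
        obtain ⟨p, ps, hps⟩ : ∃ p ps, PySem.Chars.splitOn ((c :: rest).drop 7) "status/".toList = p :: ps := by
          rcases hhh : PySem.Chars.splitOn ((c :: rest).drop 7) "status/".toList with _ | ⟨p, ps⟩
          · exact absurd hhh (splitOn_ne_nil _ hsub _)
          · exact ⟨p, ps, rfl⟩
        rw [hps] at hih ⊢
        rw [List.getLast?_cons_cons]
        rw [hih]
        by_cases hdn : PySem.Chars.rfind ((c :: rest).drop 7) "status/".toList = -1
        · rw [if_pos hdn] at *
          rw [hstep]
          norm_num
        · rw [if_neg hdn] at *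
          obtain ⟨k, hval, hle, _, _⟩ := rfind_spec_of_ne _ _ hdn
          rw [hstep, hval]
          have hne2 : (k : Int) + 7 ≠ -1 := by omega
          rw [if_neg hne2]
          have : ((k : Int) + 7).toNat = k + 7 := by omega
          rw [this, List.drop_drop]
          congr 2
          omega
      · have hr : "status/".toList <:+: rest := by
          rcases List.infix_cons_iff.mp hinf with hc | hc
          · exact absurd (List.isPrefixOf_iff_prefix.mpr hc) hp
          · exact hc
        obtain ⟨p, ps, hps⟩ : ∃ p ps, PySem.Chars.splitOn rest "status/".toList = p :: ps := by
          rcases hhh : PySem.Chars.splitOn rest "status/".toList with _ | ⟨p, ps⟩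
          · exact absurd hhh (splitOn_ne_nil _ hsub rest)
          · exact ⟨p, ps, rfl⟩
        have hps2 : ps ≠ [] := by
          have := splitOn_two _ hsub rest.length rest le_rfl hr
          rw [hps] at this
          cases ps with
          | nil => simp at this
          | cons a b => simp
        rw [splitOn_neg _ hsub c rest hp p ps hps]
        obtain ⟨x, ps', hx⟩ : ∃ x ps', ps = x :: ps' := by
          cases ps with
          | nil => exact absurd rfl hps2
          | cons x ps' => exact ⟨x, ps', rfl⟩
        subst hx
        rw [List.getLast?_cons_cons]
        have hih := ih rest (by simp at hl ⊢; omega)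
        rw [hps, List.getLast?_cons_cons] at hih
        rw [hih]
        have hrne : PySem.Chars.rfind rest "status/".toList ≠ -1 := fun hc =>
          (rfind_neg_iff _ hsub rest).mp hc hr
        obtain ⟨k, hval, hle, _, _⟩ := rfind_spec_of_ne _ _ hrne
        rw [rfind_cons _ hsub c rest, if_neg hrne, hval]
        rw [if_neg (by omega : ¬ ((k : Int) = -1)), if_neg (by omega : ¬ ((k : Int) + 1 = -1))]
        have e1 : ((k : Int)).toNat = k := by omega
        have e2 : ((k : Int) + 1).toNat = k + 1 := by omega
        rw [e1, e2]
        have : k + 1 + 7 = (k + 7) + 1 := by omega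
        rw [this, List.drop_succ_cons]

theorem pvA_loop_none (parts : List (List Char)) :
    ∀ pairs : List (Int × List Char),
      (∀ i part, (i, part) ∈ pairs → ¬(part = "status".toList ∧ i + 1 < (parts.length : Int))) →
      pvA_loop parts pairs = none := by
  intro pairs
  induction pairs with
  | nil => intro _; rfl
  | cons pr rest ih =>
    intro h
    obtain ⟨i, part⟩ := pr
    rw [pvA_loop, if_neg (h i part (List.mem_cons_self))]
    exact ih fun i' part' hm => h i' part' (List.mem_cons_of_mem _ hm)

theorem mem_enumerate' {α : Type} :
    ∀ (xs : List α) (st : Int) (i : Int) (x : α), (i, x) ∈ PySem.List.enumerate xs st →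
      ∃ k : Nat, i = st + k ∧ xs[k]? = some x := by
  intro xs
  induction xs with
  | nil => intro st i x h; simp [PySem.List.enumerate] at h
  | cons y ys ih =>
    intro st i x h
    rw [PySem.List.enumerate] at h
    rcases List.mem_cons.mp h with he | hm
    · injection he with e1 e2
      exact ⟨0, by omega, by simp [e2]⟩
    · obtain ⟨k, hk, hget⟩ := ih (st + 1) i x hm
      exact ⟨k + 1, by omega, by simpa using hget⟩

theorem loop_none_of_no_status (u : List Char) (h : ¬ "status/".toList <:+: u) :
    pvA_loop (PySem.Chars.splitOn u "/".toList)
      (PySem.List.enumerate (PySem.Chars.splitOn u "/".toList)) = none := by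
  have hsep : "/".toList ≠ [] := by decide
  apply pvA_loop_none
  rintro i part hmem ⟨hpart, hlt⟩
  obtain ⟨k, hi, hget⟩ := mem_enumerate' _ 0 i part hmem
  obtain ⟨hklt, hkeq⟩ := List.getElem?_eq_some_iff.mp hget
  set parts := PySem.Chars.splitOn u "/".toList with hparts
  have hk1 : k + 1 < parts.length := by omega
  have hdecomp : parts = parts.take k ++ part :: parts.drop (k + 1) := by
    conv_lhs => rw [← List.take_append_drop k parts]
    rw [List.drop_eq_getElem_cons hklt, hkeq]
  have hsuf : parts.drop (k + 1) ≠ [] := by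
    intro hc
    have := List.drop_eq_nil_iff.mp hc
    omega
  have hinf := splitOn_infix "/".toList hsep u.length u le_rfl
    (parts.take k) part (parts.drop (k + 1)) (by rw [← hparts]; exact hdecomp) hsuf
  rw [hpart] at hinf
  have : "status".toList ++ "/".toList = "status/".toList := by decide
  rw [this] at hinf
  exact h hinf

-- ===== VERDICT (by name: the statement is the Claim_ definition above) =====
theorem extract_tweet_id_from_url_spec : Claim_equal_extract_tweet_id_from_url := by
  intro s _
  unfold Spec_extract_tweet_id_from_url
  unfold extract_tweet_id_from_url extract_tweet_id_from_url_alt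
  have hsub : "status/".toList ≠ [] := by decide
  by_cases hinf : "status/".toList <:+: s.toList
  · -- "status/" occurs
    rw [if_pos ((PySem.Chars.isIn_iff_infix _ _).mpr hinf)]
    have hrne : PySem.Chars.rfind s.toList "status/".toList ≠ -1 := fun hc =>
      (rfind_neg_iff _ hsub s.toList).mp hc hinf
    obtain ⟨k, hval, hle, _, _⟩ := rfind_spec_of_ne _ _ hrne
    simp only [hval]
    rw [if_neg (by omega : ¬ ((k : Int) = -1))]
    have hlast := splitOn_last s.toList.length s.toList le_rfl
    rw [hval, if_neg (by omega : ¬ ((k : Int) = -1))] at hlast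
    have e1 : ((k : Int)).toNat = k := by omega
    rw [e1] at hlast
    rw [PySem.List.pyGet?_neg_one, hlast]
    simp only [Option.getD_some]
    set tail := s.toList.drop (k + 7) with htail
    have hslice : PySem.Chars.slice s.toList (some ((k : Int) + 7)) none = tail := by
      have : ((k : Int) + 7) = ((k + 7 : Nat) : Int) := by push_cast; ring
      rw [PySem.Chars.slice_eq_listSlice, this, PySem.List.slice_from_natCast]
    rw [hslice]
    have hhead := splitOn_head "?".toList (by decide) tail.length tail le_rfl
    have hqe : ("?".toList : List Char) = ['?'] := by decide
    rw [hqe] at hhead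
    rw [PySem.List.pyGet?_zero, ← List.head?_eq_getElem?]
    simp only [hqe]
    rw [hhead]
    simp only [Option.getD_some]
    by_cases hq : PySem.Chars.find tail ['?'] = -1
    · rw [if_pos hq, if_neg (by simp [hq])]
    · rw [if_neg hq, if_pos (by simp [hq])]
      have hqge : 0 ≤ PySem.Chars.find tail ['?'] := by
        have := PySem.Chars.neg_one_le_find tail ['?']
        omega
      have hq2 : PySem.Chars.find tail ['?'] = (((PySem.Chars.find tail ['?']).toNat : Nat) : Int) := by omega
      rw [PySem.Chars.slice_eq_listSlice]
      rw [hq2, PySem.List.slice_to_natCast]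
      have e9 : (((PySem.Chars.find tail ['?']).toNat : Int)).toNat = (PySem.Chars.find tail ['?']).toNat := by omega
      rw [e9]
  · -- no "status/": A falls through to strip, B's rfind is -1
    rw [if_neg (fun hc => hinf ((PySem.Chars.isIn_iff_infix _ _).mp hc))]
    rw [if_pos ((rfind_neg_iff _ hsub s.toList).mpr hinf)]
    by_cases hx : PySem.Chars.isIn "x.com".toList s.toList = true
    · rw [if_pos hx, loop_none_of_no_status s.toList hinf]
    · rw [if_neg hx]
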